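-- pv_equiv track=rewrite | github.com/sueszli/vector-database-benchmark | dataset/python-mutated/AbsolutePosition.py | calc_line_col
-- ===== SOURCE A (Python) =====
-- def calc_line_col(text, position):
--     if False:
--         i = 10
--         return i + 15
--     "\n    Creates a tuple containing (line, column) by calculating line number\n    and column in the text, from position.\n\n    The position represents the index of a character. In the following\n    example 'a' is at position '0' and it's corresponding line and column are:\n\n    >>> calc_line_col(('a\\n',), 0)\n    (1, 1)\n\n    All special characters(including the newline character) belong in the same\n    line, and have their own position. A line is an item in the tuple:\n\n    >>> calc_line_col(('a\\n', 'b\\n'), 1)\n    (1, 2)\n    >>> calc_line_col(('a\\n', 'b\\n'), 2)\n    (2, 1)\n\n    :param text:          A tuple/list of lines in which position is to\n                          be calculated.\n    :param position:      Position (starting from 0) of character to be found\n                          in the (line, column) form.\n    :return:              A tuple of the form (line, column), where both line\n                          and column start from 1.\n    "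
--     for (linenum, line) in enumerate(text, start=1):
--         linelen = len(line)
--         if position < linelen:
--             return (linenum, position + 1)
--         position -= linelen
--     raise ValueError('Position not found in text')
-- ===== SOURCE B (Python) =====
-- def calc_line_col(text, position):
--     # Build a prefix-sum table of line lengths once, then binary-search it
--     # (bisect_right) instead of A's subtract-and-scan loop.
--     prefix = []
--     total = 0
--     for line in text:
--         total += len(line)
--         prefix.append(total)
--     lo, hi = 0, len(prefix)
--     while lo < hi:
--         mid = (lo + hi) // 2
--         if position < prefix[mid]:
--             hi = mid
--         else:
--             lo = mid + 1
--     if lo == len(prefix):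
--         raise ValueError('Position not found in text')
--     prev = prefix[lo - 1] if lo > 0 else 0
--     return (lo + 1, position - prev + 1)
-- ===== Notes on version B (the rewrite author's own statement) =====
-- stated objective: alternative
-- what changed: Replaces A's linear subtract-and-scan over the lines with a prefix-sum table built once plus a bisect_right-style binary search for the line index.
import Mathlib
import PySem

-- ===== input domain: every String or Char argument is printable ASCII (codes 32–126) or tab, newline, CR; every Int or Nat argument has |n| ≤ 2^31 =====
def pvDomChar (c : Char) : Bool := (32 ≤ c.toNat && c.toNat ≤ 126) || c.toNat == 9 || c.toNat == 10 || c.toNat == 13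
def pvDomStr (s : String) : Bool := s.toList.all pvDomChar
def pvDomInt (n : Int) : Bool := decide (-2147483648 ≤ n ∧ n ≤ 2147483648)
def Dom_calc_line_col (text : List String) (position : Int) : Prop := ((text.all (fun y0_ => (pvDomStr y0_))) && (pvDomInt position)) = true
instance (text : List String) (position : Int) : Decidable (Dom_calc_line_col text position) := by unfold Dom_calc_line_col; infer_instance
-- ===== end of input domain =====

-- B replaces A's subtract-and-scan over the lines with a prefix-sum table plus a
-- bisect_right binary search (alternative decomposition, same exact results).


-- ===== PORT A =====
-- A's for-loop over enumerate(text, start=1), carrying (linenum, position); none = ValueError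
def calcAuxA : List String → Int → Int → Option (Int × Int)
  | [], _, _ => none
  | line :: rest, linenum, position =>
      let linelen := PySem.Str.len line
      if position < linelen then some (linenum, position + 1)
      else calcAuxA rest (linenum + 1) (position - linelen)

def calc_line_col (text : List String) (position : Int) : Int × Int :=
  (calcAuxA text 1 position).getD (0, 0)  -- getD unreachable under Pre_ (none = ValueError)

-- ===== PORT B =====
-- the for-loop building the prefix list (total accumulator, one cell appended per line)
def cumLens : List String → Int → List Int
  | [], _ => []
  | line :: rest, total =>
      (total + PySem.Str.len line) :: cumLens rest (total + PySem.Str.len line)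

def calc_line_col_alt (text : List String) (position : Int) : Int × Int :=
  let pref := cumLens text 0
  -- the lo/hi binary-search while-loop of Source B is exactly PySem.List.bisectRight
  let lo := PySem.List.bisectRight pref position
  if lo = pref.length then (0, 0)  -- ValueError, unreachable under Pre_
  else
    let prev := if 0 < lo then pref.getD (lo - 1) 0 else 0
    ((lo : Int) + 1, position - prev + 1)

-- ===== PRECONDITION & SPEC =====
def sumLens (text : List String) : Int := (text.map PySem.Str.len).sum

-- A raises ValueError iff text is empty or position ≥ total length; exactly those inputs are excluded.
def Pre_calc_line_col (text : List String) (position : Int) : Prop :=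
  text ≠ [] ∧ position < sumLens text
instance (text : List String) (position : Int) : Decidable (Pre_calc_line_col text position) := by
  unfold Pre_calc_line_col; infer_instance

def pvWitness_calc_line_col : List String × Int := (["a\n", "b\n"], 2)

def Spec_calc_line_col (text : List String) (position : Int) (out : Int × Int) : Prop := out = calc_line_col_alt text position
instance (text : List String) (position : Int) (out : Int × Int) : Decidable (Spec_calc_line_col text position out) := by unfold Spec_calc_line_col; infer_instance

-- ===== CLAIM (what is proved, stated in full; the proofs are below) =====
def Claim_equal_calc_line_col : Prop := ∀ (text : List String) (position : Int), Dom_calc_line_col text position → Pre_calc_line_col text position → Spec_calc_line_col text position (calc_line_col text position)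

-- ===== LEMMAS AND PROOFS =====

theorem cum_shift (ls : List String) (a b : Int) :
    cumLens ls (a + b) = (cumLens ls b).map (a + ·) := by
  induction ls generalizing b with
  | nil => simp [cumLens]
  | cons l rest ih =>
      simp only [cumLens, List.map_cons]
      rw [add_assoc, ih]

theorem cum_mem_ge (ls : List String) (a x : Int) (hx : x ∈ cumLens ls a) : a ≤ x := by
  induction ls generalizing a with
  | nil => simp [cumLens] at hx
  | cons l rest ih =>
      simp only [cumLens, List.mem_cons] at hx
      have hl : (0 : Int) ≤ PySem.Str.len l := by rw [PySem.Str.len_eq]; positivity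
      rcases hx with h | h
      · omega
      · have := ih (a + PySem.Str.len l) h; omega

theorem cum_sorted (ls : List String) (a : Int) :
    (cumLens ls a).Pairwise (fun x1 x2 => x1 ≤ x2) := by
  induction ls generalizing a with
  | nil => simp [cumLens]
  | cons l rest ih =>
      simp only [cumLens, List.pairwise_cons]
      exact ⟨fun x hx => cum_mem_ge _ _ _ hx, ih _⟩

theorem cum_mem_total (ls : List String) (a : Int) (h : ls ≠ []) :
    (a + sumLens ls) ∈ cumLens ls a := by
  induction ls generalizing a with
  | nil => exact absurd rfl h
  | cons l rest ih =>
      simp only [cumLens, sumLens, List.map_cons, List.sum_cons, List.mem_cons]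
      rcases eq_or_ne rest [] with hr | hr
      · subst hr; simp
      · right
        have := ih (a + PySem.Str.len l) hr
        simpa [sumLens, add_assoc] using this

theorem bisect_eq (xs : List Int) (x : Int) (k : Nat)
    (hs : xs.Pairwise (fun x1 x2 => x1 ≤ x2))
    (hk : k ≤ xs.length)
    (hlt : ∀ j (hj : j < xs.length), j < k → xs[j] ≤ x)
    (hge : ∀ j (hj : j < xs.length), k ≤ j → x < xs[j]) :
    PySem.List.bisectRight xs x = k := by
  obtain ⟨hb, h1, h2⟩ := PySem.List.bisectRight_spec xs x hs
  set b := PySem.List.bisectRight xs x with hbdef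
  rcases Nat.lt_trichotomy b k with h | h | h
  · have hj : b < xs.length := lt_of_lt_of_le h hk
    have := hlt b hj h
    have := h2 b hj le_rfl
    omega
  · exact h
  · have hj : k < xs.length := lt_of_lt_of_le h hb
    have := h1 k hj h
    have := hge k hj le_rfl
    omega

theorem bisect_cum_lt_len (ls : List String) (a pos : Int) (h : ls ≠ [])
    (hpos : pos < a + sumLens ls) :
    PySem.List.bisectRight (cumLens ls a) pos < (cumLens ls a).length := by
  obtain ⟨hb, h1, _⟩ := PySem.List.bisectRight_spec (cumLens ls a) pos (cum_sorted ls a)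
  rcases lt_or_eq_of_le hb with h' | h'
  · exact h'
  · exfalso
    obtain ⟨j, hj, hv⟩ := List.mem_iff_getElem.mp (cum_mem_total ls a h)
    have := h1 j hj (h' ▸ hj)
    omega

theorem cum_cons (l : String) (rest : List String) :
    cumLens (l :: rest) 0 = PySem.Str.len l :: (cumLens rest 0).map (PySem.Str.len l + ·) := by
  have := cum_shift rest (PySem.Str.len l) 0
  simp only [cumLens, zero_add]
  rw [← this, add_zero]

-- in the first-line case the binary search returns 0
theorem bisect_head (l : String) (rest : List String) (pos : Int) (hpos : pos < PySem.Str.len l) :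
    PySem.List.bisectRight (cumLens (l :: rest) 0) pos = 0 := by
  apply bisect_eq _ _ _ (cum_sorted _ _) (Nat.zero_le _)
  · omega
  · intro j hj _
    have hmem : (cumLens (l :: rest) 0)[j] ∈ cumLens (l :: rest) 0 := List.getElem_mem hj
    have hmem2 : (cumLens (l :: rest) 0)[j] ∈ PySem.Str.len l :: (cumLens rest 0).map (PySem.Str.len l + ·) := by
      rw [← cum_cons]; exact hmem
    rcases List.mem_cons.mp hmem2 with he | he
    · omega
    · obtain ⟨y, hy, hv⟩ := List.mem_map.mp he
      have := cum_mem_ge rest 0 y hy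
      omega

-- under Pre_, B's raise branch is unreachable and its value has this closed shape
theorem alt_char (ls : List String) (pos : Int) (h : ls ≠ []) (hpos : pos < sumLens ls) :
    calc_line_col_alt ls pos =
      ((PySem.List.bisectRight (cumLens ls 0) pos : Int) + 1,
       pos - (if 0 < PySem.List.bisectRight (cumLens ls 0) pos then
                (cumLens ls 0).getD (PySem.List.bisectRight (cumLens ls 0) pos - 1) 0 else 0) + 1) := by
  have hk := bisect_cum_lt_len ls 0 pos h (by simpa using hpos)
  simp only [calc_line_col_alt]
  rw [if_neg (by omega)]

theorem cum_getD_cons (l : String) (rest : List String) (k : Nat)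
    (hklen : k < (cumLens rest 0).length) :
    (cumLens (l :: rest) 0).getD k 0 =
      PySem.Str.len l + (if 0 < k then (cumLens rest 0).getD (k - 1) 0 else 0) := by
  rw [cum_cons]
  match k with
  | 0 => simp
  | m + 1 =>
      have hm : m < (cumLens rest 0).length := by omega
      simp only [List.getD_cons_succ, if_pos (Nat.succ_pos m), Nat.add_sub_cancel]
      simp [List.getD, List.getElem?_map, List.getElem?_eq_getElem hm]

-- past the first line, the binary search lands one past the tail's answer
theorem bisect_cons_step (l : String) (rest : List String) (pos : Int)
    (hL : PySem.Str.len l ≤ pos) :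
    PySem.List.bisectRight (cumLens (l :: rest) 0) pos =
      PySem.List.bisectRight (cumLens rest 0) (pos - PySem.Str.len l) + 1 := by
  obtain ⟨hb', h1', h2'⟩ :=
    PySem.List.bisectRight_spec (cumLens rest 0) (pos - PySem.Str.len l) (cum_sorted rest 0)
  apply bisect_eq _ _ _ (cum_sorted _ _)
  · rw [cum_cons]; simp only [List.length_cons, List.length_map]; omega
  · intro j hj hjk
    simp only [cum_cons]
    match j with
    | 0 => simpa using hL
    | i + 1 =>
        have hi : i < (cumLens rest 0).length := by rw [cum_cons] at hj; simpa using hj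
        simp only [List.getElem_cons_succ, List.getElem_map]
        have := h1' i hi (by omega)
        omega
  · intro j hj hjk
    simp only [cum_cons]
    match j with
    | 0 => omega
    | i + 1 =>
        have hi : i < (cumLens rest 0).length := by rw [cum_cons] at hj; simpa using hj
        simp only [List.getElem_cons_succ, List.getElem_map]
        have := h2' i hi (by omega)
        omega

-- past the first line, B's answer is the tail's answer shifted by one line
theorem alt_step (l : String) (rest : List String) (pos : Int) (hrest : rest ≠ [])
    (hL : PySem.Str.len l ≤ pos) (hpos : pos - PySem.Str.len l < sumLens rest) :
    calc_line_col_alt (l :: rest) pos =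
      ((calc_line_col_alt rest (pos - PySem.Str.len l)).1 + 1,
       (calc_line_col_alt rest (pos - PySem.Str.len l)).2) := by
  have hk' : PySem.List.bisectRight (cumLens rest 0) (pos - PySem.Str.len l) <
      (cumLens rest 0).length :=
    bisect_cum_lt_len rest 0 _ hrest (by simpa using hpos)
  have hsumc : sumLens (l :: rest) = PySem.Str.len l + sumLens rest := by simp [sumLens]
  rw [alt_char (l :: rest) pos (by simp) (by omega),
      alt_char rest (pos - PySem.Str.len l) hrest hpos,
      bisect_cons_step l rest pos hL]
  rw [if_pos (Nat.succ_pos _), Nat.add_sub_cancel,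
      cum_getD_cons l rest _ hk']
  simp only [Prod.mk.injEq]
  constructor
  · push_cast; ring
  · split_ifs <;> ring

-- main induction: A's scan equals B's bisect-based answer (offset n for the line number)
theorem main_lemma (ls : List String) (pos n : Int) (h : ls ≠ []) (hpos : pos < sumLens ls) :
    calcAuxA ls n pos =
      some (n - 1 + (calc_line_col_alt ls pos).1, (calc_line_col_alt ls pos).2) := by
  induction ls generalizing pos n with
  | nil => exact absurd rfl h
  | cons l rest ih =>
      have hL : (0 : Int) ≤ PySem.Str.len l := by rw [PySem.Str.len_eq]; positivity
      by_cases hc : pos < PySem.Str.len l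
      · -- found on the first line
        have hb := bisect_head l rest pos hc
        simp only [calcAuxA, if_pos hc, calc_line_col_alt, hb]
        rw [if_neg (by rw [cum_cons]; simp)]
        simp
      · -- recurse into the tail
        have hsum : sumLens (l :: rest) = PySem.Str.len l + sumLens rest := by
          simp [sumLens]
        have hrest : rest ≠ [] := by
          rintro rfl
          have h0 : sumLens ([] : List String) = 0 := by simp [sumLens]
          rw [hsum, h0] at hpos
          omega
        have hpos' : pos - PySem.Str.len l < sumLens rest := by omega
        rw [alt_step l rest pos hrest (by omega) hpos']
        simp only [calcAuxA, if_neg hc]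
        rw [ih (pos - PySem.Str.len l) (n + 1) hrest hpos']
        simp only [Option.some.injEq, Prod.mk.injEq, and_true]
        ring

-- ===== VERDICT (by name: the statement is the Claim_ definition above) =====
theorem calc_line_col_spec : Claim_equal_calc_line_col := by
  intro text position _ hpre
  unfold Spec_calc_line_col calc_line_col
  rw [main_lemma text position 1 hpre.1 hpre.2]
  simp
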